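-- pv_equiv track=rewrite | github.com/FranzScheerer/DES | h3.py | hextxt2num
-- ===== SOURCE A (Python) =====
-- def hextxt2num(x):
--   res = 0
--   for c in x:
--     if ord(c) < 58 and ord(c) >= 48:
--        res = (res<<4) + ord(c) - 48
--     elif ord(c) <= ord('f') and ord(c) >= ord('a'):
--        res = (res<<4) + ord(c) - 87
--   return res
-- ===== SOURCE B (Python) =====
-- def hextxt2num(x):
--   s = ''.join(c for c in x if '0' <= c <= '9' or 'a' <= c <= 'f')
--   return int(s, 16) if s else 0
-- ===== Notes on version B (the rewrite author's own statement) =====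
-- stated objective: simpler
-- what changed: Replaces the manual per-character shift-and-add accumulator with a filter (keeping only lowercase hex digits) followed by a single library parse int(s,16), returning 0 when no valid digit remains.
import Mathlib
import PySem

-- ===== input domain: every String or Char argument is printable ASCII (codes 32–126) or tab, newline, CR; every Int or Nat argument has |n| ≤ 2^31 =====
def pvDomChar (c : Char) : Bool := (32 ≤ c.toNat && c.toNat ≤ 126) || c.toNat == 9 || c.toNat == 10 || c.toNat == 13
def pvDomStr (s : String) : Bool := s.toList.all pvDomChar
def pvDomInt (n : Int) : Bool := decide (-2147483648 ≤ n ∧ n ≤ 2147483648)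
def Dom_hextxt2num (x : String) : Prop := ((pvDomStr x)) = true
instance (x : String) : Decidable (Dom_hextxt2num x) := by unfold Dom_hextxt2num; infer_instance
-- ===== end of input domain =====

-- B replaces A's per-character shift-and-add loop by filtering the lowercase hex digits
-- and parsing the remaining string with one library-style base-16 parse (simpler decomposition).
-- ===== PORT A =====
-- loop body of A's for-loop, named for the fold
def pvStepA (res : Int) (c : Char) : Int :=
  if c.toNat < 58 ∧ c.toNat ≥ 48 then (res <<< (4:Nat)) + (c.toNat : Int) - 48
  else if c.toNat ≤ 102 ∧ c.toNat ≥ 97 then (res <<< (4:Nat)) + (c.toNat : Int) - 87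
  else res

def hextxt2num (x : String) : Int := x.toList.foldl pvStepA 0

-- ===== PORT B =====
-- Source B's filter condition ('0' <= c <= '9' or 'a' <= c <= 'f'; Python compares chars by code point)
def pvIsHex (c : Char) : Bool := (48 ≤ c.toNat && c.toNat ≤ 57) || (97 ≤ c.toNat && c.toNat ≤ 102)

-- port of Python's int(s, 16) on a string of lowercase hex digits
def pvHexDigit (c : Char) : Int := if c.toNat ≤ 57 then (c.toNat : Int) - 48 else (c.toNat : Int) - 87

def pvParseHex (s : List Char) : Int := s.foldl (fun acc c => 16 * acc + pvHexDigit c) 0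

def hextxt2num_alt (x : String) : Int :=
  let s := x.toList.filter pvIsHex
  if s.isEmpty then 0 else pvParseHex s

-- ===== PRECONDITION & SPEC =====
def Spec_hextxt2num (x : String) (out : Int) : Prop := out = hextxt2num_alt x
instance (x : String) (out : Int) : Decidable (Spec_hextxt2num x out) := by unfold Spec_hextxt2num; infer_instance

-- ===== CLAIM (what is proved, stated in full; the proofs are below) =====
def Claim_equal_hextxt2num : Prop := ∀ (x : String), Dom_hextxt2num x → Spec_hextxt2num x (hextxt2num x)

-- ===== LEMMAS AND PROOFS =====
-- The two folds agree for any accumulator: A skips invalid chars, B removes them first.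
theorem fold_eq (l : List Char) (r : Int) :
    l.foldl pvStepA r = (l.filter pvIsHex).foldl (fun acc c => 16 * acc + pvHexDigit c) r := by
  induction l generalizing r with
  | nil => rfl
  | cons c l ih =>
    simp only [List.foldl_cons, List.filter_cons]
    by_cases h1 : c.toNat < 58 ∧ c.toNat ≥ 48
    · have hb : pvIsHex c = true := by unfold pvIsHex; simp; omega
      rw [hb, if_pos rfl, List.foldl_cons, ih]
      congr 1
      unfold pvStepA pvHexDigit
      rw [if_pos h1, if_pos (by omega : c.toNat ≤ 57), Int.shiftLeft_eq]
      ring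
    · by_cases h2 : c.toNat ≤ 102 ∧ c.toNat ≥ 97
      · have hb : pvIsHex c = true := by unfold pvIsHex; simp; omega
        rw [hb, if_pos rfl, List.foldl_cons, ih]
        congr 1
        unfold pvStepA pvHexDigit
        rw [if_neg h1, if_pos h2, if_neg (by omega : ¬ c.toNat ≤ 57), Int.shiftLeft_eq]
        ring
      · have hb : pvIsHex c = false := by unfold pvIsHex; simp; omega
        rw [hb, if_neg (by simp), ih]
        congr 1
        unfold pvStepA
        rw [if_neg h1, if_neg h2]

-- ===== VERDICT (by name: the statement is the Claim_ definition above) =====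
theorem hextxt2num_spec : Claim_equal_hextxt2num := by
  intro x _
  unfold Spec_hextxt2num hextxt2num hextxt2num_alt pvParseHex
  rw [fold_eq]
  by_cases h : (x.toList.filter pvIsHex).isEmpty
  · rw [if_pos h, List.isEmpty_iff.mp h]; rfl
  · rw [if_neg h]
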